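-- pv_equiv track=rewrite | github.com/mdanny2785-sketch/CMYK-Color-Suite-v2.4-Print-SVG-PSVG | cmyk_core-1.py | normalise_style_string
-- ===== SOURCE A (Python) =====
-- from typing import Dict, Iterator, List, Optional, Tuple, Union
--
-- def normalise_style_string(style: str) -> str:
--     props: Dict[str, str] = {}
--     for part in style.split(";"):
--         part = part.strip()
--         if ":" in part:
--             k, v = part.split(":", 1)
--             k, v = k.strip(), v.strip()
--             if k and v:
--                 props[k] = v
--     return ";".join(f"{k}:{props[k]}" for k in sorted(props))
-- ===== SOURCE B (Python) =====
-- def normalise_style_string(style: str) -> str: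
--     pairs = []
--     for part in style.split(";"):
--         part = part.strip()
--         if ":" in part:
--             k, v = part.split(":", 1)
--             k, v = k.strip(), v.strip()
--             if k and v:
--                 pairs.append((k, v))
--     pairs.sort(key=lambda p: p[0])  # stable: duplicates of a key keep source order
--     out = []
--     for i, (k, v) in enumerate(pairs):
--         if i + 1 == len(pairs) or pairs[i + 1][0] != k:
--             out.append(k + ":" + v)
--     return ";".join(out)
-- ===== Notes on version B (the rewrite author's own statement) =====
-- stated objective: alternative
-- what changed: B never builds a dict: it collects every parsed pair, stably sorts the whole pair list by key, and a single linear scan over the sorted list emits only the last element of each equal-key run (which by stability is the key's last occurrence), whereas A dedupes by overwriting a dict and then sorts the keys.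
import Mathlib
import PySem

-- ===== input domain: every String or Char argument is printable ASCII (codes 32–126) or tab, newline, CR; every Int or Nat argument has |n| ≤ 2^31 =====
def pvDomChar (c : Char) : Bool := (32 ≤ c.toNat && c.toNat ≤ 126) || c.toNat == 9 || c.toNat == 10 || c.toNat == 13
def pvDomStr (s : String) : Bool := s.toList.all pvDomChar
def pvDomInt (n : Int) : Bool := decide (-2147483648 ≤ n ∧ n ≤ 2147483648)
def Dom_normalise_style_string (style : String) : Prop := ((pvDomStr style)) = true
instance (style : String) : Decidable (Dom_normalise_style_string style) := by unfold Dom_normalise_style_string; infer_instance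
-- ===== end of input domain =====

-- B dedupes without a dict: it stably sorts the full parsed-pair list by key and one linear scan
-- keeps the last element of each equal-key run (= the key's last occurrence) (objective: alternative).

-- ===== PORT A =====
-- shared helper: one ';'-part of the style string → its stripped (key, value) pair, if valid
-- (both Pythons run exactly this per-part code: strip; ':' in part; split(':', 1); strip; 'if k and v')
def pvParse? (part : String) : Option (String × String) :=
  let part := PySem.Str.strip part
  if PySem.Str.isIn ":" part then
    -- ':' is in part, so part.split(':', 1) has exactly two pieces; unpacking never raises
    match PySem.Str.splitMax? part ":" 1 with
    | some (k :: v :: _) =>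
      let k := PySem.Str.strip k
      let v := PySem.Str.strip v
      if k ≠ "" ∧ v ≠ "" then some (k, v) else none
    | _ => none
  else none

def normalise_style_string (style : String) : String :=
  -- style.split(';'): the separator is nonempty, so split? is always `some`
  let parts := (PySem.Str.split? style ";").getD []
  let props := parts.foldl (fun (d : PySem.Dict String String) part =>
      match pvParse? part with
      | some (k, v) => d.insert k v
      | none => d) PySem.Dict.empty
  -- props[k] for k ∈ sorted(props): the key is present, so getD's default is never used
  PySem.Str.join ";" ((PySem.List.sorted props.keys (fun k => k)).map
      (fun k => k ++ ":" ++ props.getD k ""))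

-- ===== PORT B =====
-- B's emit loop: out.append(k + ":" + v) exactly when this pair is the last one or the next key differs
def pvEmit : List (String × String) → List String
  | [] => []
  | [p] => [p.1 ++ ":" ++ p.2]
  | p :: q :: t => if q.1 ≠ p.1 then (p.1 ++ ":" ++ p.2) :: pvEmit (q :: t) else pvEmit (q :: t)

def normalise_style_string_alt (style : String) : String :=
  let parts := (PySem.Str.split? style ";").getD []
  let pairs := parts.foldl (fun (acc : List (String × String)) part =>
      match pvParse? part with
      | some p => acc ++ [p]
      | none => acc) []
  let sorted := PySem.List.sorted pairs (fun p => p.1)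
  PySem.Str.join ";" (pvEmit sorted)

-- ===== PRECONDITION & SPEC =====
def Spec_normalise_style_string (style : String) (out : String) : Prop := out = normalise_style_string_alt style
instance (style : String) (out : String) : Decidable (Spec_normalise_style_string style out) := by unfold Spec_normalise_style_string; infer_instance

-- ===== CLAIM (what is proved, stated in full; the proofs are below) =====
def Claim_equal_normalise_style_string : Prop := ∀ (style : String), Dom_normalise_style_string style → Spec_normalise_style_string style (normalise_style_string style)

-- ===== LEMMAS AND PROOFS =====

-- the dict A builds from a list of parsed pairs
def pvDictOf (ps : List (String × String)) : PySem.Dict String String :=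
  ps.foldl (fun d p => d.insert p.1 p.2) PySem.Dict.empty

-- the pairs B's scan keeps (pvEmit = fmt-map of this)
def pvLast : List (String × String) → List (String × String)
  | [] => []
  | [p] => [p]
  | p :: q :: t => if q.1 ≠ p.1 then p :: pvLast (q :: t) else pvLast (q :: t)

lemma pvEmit_eq_map (l : List (String × String)) :
    pvEmit l = (pvLast l).map (fun p => p.1 ++ ":" ++ p.2) := by
  induction l with
  | nil => rfl
  | cons p t ih =>
    cases t with
    | nil => rfl
    | cons q r =>
      by_cases h : q.1 ≠ p.1
      · simp [pvEmit, pvLast, h, ih]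
      · simp [pvEmit, pvLast, h, ih]

lemma pvLast_sublist (l : List (String × String)) : (pvLast l).Sublist l := by
  induction l with
  | nil => simp [pvLast]
  | cons p t ih =>
    cases t with
    | nil => simp [pvLast]
    | cons q r =>
      by_cases h : q.1 ≠ p.1
      · rw [pvLast, if_pos h]; exact ih.cons₂ p
      · rw [pvLast, if_neg h]; exact ih.cons p

-- A's parse-and-insert loop factors through the parsed-pair list
lemma pvFoldA_eq (parts : List String) (d : PySem.Dict String String) :
    parts.foldl (fun d part =>
      match pvParse? part with
      | some (k, v) => d.insert k v
      | none => d) d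
    = (parts.filterMap pvParse?).foldl (fun d p => d.insert p.1 p.2) d := by
  induction parts generalizing d with
  | nil => rfl
  | cons h t ih =>
    simp only [List.foldl_cons, List.filterMap_cons]
    cases hp : pvParse? h with
    | none => simp [ih]
    | some p => cases p; simp [ih]

-- B's collecting loop is a filterMap
lemma pvFoldB_eq (parts : List String) (acc : List (String × String)) :
    parts.foldl (fun acc part =>
      match pvParse? part with
      | some p => acc ++ [p]
      | none => acc) acc
    = acc ++ parts.filterMap pvParse? := by
  induction parts generalizing acc with
  | nil => simp
  | cons h t ih =>
    simp only [List.foldl_cons, List.filterMap_cons]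
    cases hp : pvParse? h with
    | none => simp [ih]
    | some p => simp [ih]

lemma pvMemDict (ps : List (String × String)) (p : String × String) :
    p ∈ (pvDictOf ps).items ↔ ps.reverse.find? (fun q => q.1 == p.1) = some p := by
  induction ps using List.reverseRecOn with
  | nil => simp [pvDictOf, PySem.Dict.empty]
  | append_singleton t q ih =>
    have hd : pvDictOf (t ++ [q]) = (pvDictOf t).insert q.1 q.2 := by
      simp [pvDictOf]
    rw [hd, PySem.Dict.mem_items_insert]
    simp only [List.reverse_append, List.reverse_singleton, List.singleton_append,
      List.find?_cons]
    by_cases hk : q.1 = p.1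
    · have hb : (q.1 == p.1) = true := by simp [hk]
      simp only [hb]
      constructor
      · rintro (rfl | ⟨_, hne⟩)
        · simp
        · exact absurd hk.symm hne
      · intro h
        have hq : q = p := by injection h
        left
        rw [← hq]
    · have hb : (q.1 == p.1) = false := by simp [hk]
      simp only [hb]
      rw [ih]
      constructor
      · rintro (rfl | ⟨h, _⟩)
        · exact absurd rfl hk
        · exact h
      · intro h
        exact Or.inr ⟨h, fun hpq => hk hpq.symm⟩

lemma pvDictNodup (ps : List (String × String)) : (pvDictOf ps).keys.Nodup := by
  have h : (PySem.Dict.empty : PySem.Dict String String).keys.Nodup := by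
    simp [PySem.Dict.empty, PySem.Dict.keys]
  exact PySem.Dict.nodup_keys_foldl_insert_key ps Prod.fst (fun _ p => p.2) PySem.Dict.empty h

-- last match of a key in l = last element of l's equal-key filter
lemma pvFind_reverse_eq_getLast? (l : List (String × String)) (c : String) :
    l.reverse.find? (fun q => q.1 == c) = (l.filter (fun q => q.1 == c)).getLast? := by
  rw [← List.head?_filter, List.filter_reverse, List.head?_reverse]

lemma pvGetLast?_cons_of_ne_nil {α : Type} (a : α) (l : List α) (h : l ≠ []) :
    (a :: l).getLast? = l.getLast? := by
  cases l with
  | nil => exact absurd rfl h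
  | cons b t => exact List.getLast?_cons_cons

-- inserting into a key-ordered list: the equal-key filter gains x at the END (stability)
lemma pvInsertBy_filter (x : String × String) (ys : List (String × String)) (c : String)
    (hs : ys.Pairwise (fun a b => a.1 ≤ b.1)) :
    (PySem.List.insertBy (fun a b => decide (a.1 < b.1)) x ys).filter (fun q => q.1 == c)
    = ys.filter (fun q => q.1 == c) ++ (if x.1 == c then [x] else []) := by
  induction ys with
  | nil => simp [PySem.List.insertBy, List.filter_cons]
  | cons y t ih =>
    rw [PySem.List.insertBy]
    by_cases hlt : x.1 < y.1
    · rw [if_pos (decide_eq_true hlt), List.filter_cons, List.filter_cons]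
      by_cases hx : x.1 = c
      · have hall : t.filter (fun q => q.1 == c) = [] ∧ (y.1 == c) = false := by
          have hyt : ∀ z ∈ y :: t, y.1 ≤ z.1 := by
            intro z hz
            rcases List.mem_cons.mp hz with rfl | hz
            · exact le_refl _
            · exact (List.pairwise_cons.mp hs).1 z hz
          constructor
          · apply List.filter_eq_nil_iff.mpr
            intro z hz
            have := hyt z (List.mem_cons_of_mem _ hz)
            simp only [beq_iff_eq]
            intro he; rw [he, ← hx] at this; exact absurd (lt_of_lt_of_le hlt this) (lt_irrefl _)
          · simp only [beq_eq_false_iff_ne, ne_eq]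
            intro he; rw [he, ← hx] at hlt; exact absurd hlt (lt_irrefl _)
        simp [hx, hall.1, hall.2]
      · have hb : (x.1 == c) = false := by simp [hx]
        simp [hb]
    · rw [if_neg (by simp [hlt]), List.filter_cons, List.filter_cons,
        ih (List.pairwise_cons.mp hs).2]
      by_cases hy : (y.1 == c) = true <;> simp [hy]

-- stability: sorting by key does not change any equal-key filter
lemma pvSorted_filter (ps : List (String × String)) (c : String) :
    (PySem.List.sorted ps (fun p => p.1)).filter (fun q => q.1 == c)
    = ps.filter (fun q => q.1 == c) := by
  induction ps using List.reverseRecOn with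
  | nil => rfl
  | append_singleton t x ih =>
    have h1 : PySem.List.sorted (t ++ [x]) (fun p => p.1)
        = PySem.List.insertBy (fun a b => decide (a.1 < b.1)) x
            (PySem.List.sorted t (fun p => p.1)) := by
      rw [PySem.List.sorted_eq_foldl_insertBy, PySem.List.sorted_eq_foldl_insertBy,
        List.foldl_append, List.foldl_cons, List.foldl_nil]
    rw [h1, pvInsertBy_filter x _ c (PySem.List.sorted_pairwise t (fun p => p.1)), ih,
      List.filter_append, List.filter_cons]
    by_cases hx : (x.1 == c) = true <;> simp [hx]

-- membership in the last-of-run scan of a key-ordered list = being the last equal-key element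
lemma pvMemLast (l : List (String × String)) (hs : l.Pairwise (fun a b => a.1 ≤ b.1))
    (p : String × String) :
    p ∈ pvLast l ↔ (l.filter (fun q => q.1 == p.1)).getLast? = some p := by
  induction l with
  | nil => simp [pvLast]
  | cons a t ih =>
    have hst := (List.pairwise_cons.mp hs).2
    have hat := (List.pairwise_cons.mp hs).1
    cases t with
    | nil =>
      simp only [pvLast, List.mem_singleton, List.filter_cons, List.filter_nil]
      by_cases h : a.1 = p.1
      · have hb : (a.1 == p.1) = true := by simp [h]
        simp only [hb, if_pos]
        constructor
        · rintro rfl; rfl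
        · intro he
          exact (Option.some.inj he).symm
      · have hb : (a.1 == p.1) = false := by simp [h]
        rw [if_neg (by simp [hb])]
        simp only [List.getLast?_nil, reduceCtorEq, iff_false]
        rintro rfl
        exact h rfl
    | cons q r =>
      rw [List.filter_cons]
      by_cases hqa : q.1 ≠ a.1
      · have hpv : pvLast (a :: q :: r) = a :: pvLast (q :: r) := by
          rw [pvLast, if_pos hqa]
        have haq : a.1 < q.1 :=
          lt_of_le_of_ne (hat q List.mem_cons_self) (Ne.symm hqa)
        have hgt : ∀ z ∈ q :: r, a.1 < z.1 := by
          intro z hz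
          rcases List.mem_cons.mp hz with rfl | hz
          · exact haq
          · exact lt_of_lt_of_le haq ((List.pairwise_cons.mp hst).1 z hz)
        by_cases h : a.1 = p.1
        · have hb : (a.1 == p.1) = true := by simp [h]
          have hfe : (q :: r).filter (fun q => q.1 == p.1) = [] := by
            apply List.filter_eq_nil_iff.mpr
            intro z hz
            simp only [beq_iff_eq]
            intro he
            exact absurd (he ▸ hgt z hz) (h ▸ lt_irrefl _)
          have hnp : p ∉ pvLast (q :: r) := by
            intro hm
            have hz := (pvLast_sublist (q :: r)).subset hm
            exact absurd (h ▸ hgt p hz) (lt_irrefl _)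
          rw [hpv, if_pos hb, hfe]
          simp only [List.mem_cons, List.getLast?_singleton]
          constructor
          · rintro (rfl | hm)
            · rfl
            · exact absurd hm hnp
          · intro he
            exact Or.inl (Option.some.inj he).symm
        · have hb : (a.1 == p.1) = false := by simp [h]
          rw [hpv, if_neg (by simp [hb])]
          simp only [List.mem_cons]
          rw [← ih hst]
          constructor
          · rintro (rfl | hm)
            · exact absurd rfl h
            · exact hm
          · exact Or.inr
      · have hpv : pvLast (a :: q :: r) = pvLast (q :: r) := by
          rw [pvLast, if_neg hqa]
        have hq : q.1 = a.1 := not_not.mp hqa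
        rw [hpv, ih hst]
        by_cases h : a.1 = p.1
        · have hb : (a.1 == p.1) = true := by simp [h]
          rw [if_pos hb]
          have hne : (q :: r).filter (fun z => z.1 == p.1) ≠ [] := by
            intro he
            have hqm : q ∈ (q :: r).filter (fun z => z.1 == p.1) :=
              List.mem_filter.mpr ⟨List.mem_cons_self, by simp [hq, h]⟩
            rw [he] at hqm
            exact absurd hqm List.not_mem_nil
          rw [pvGetLast?_cons_of_ne_nil a _ hne]
        · have hb : (a.1 == p.1) = false := by simp [h]
          rw [if_neg (by simp [hb])]

-- the last-of-run scan of a key-ordered list has strictly increasing keys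
lemma pvLastPairwise (l : List (String × String)) (hs : l.Pairwise (fun a b => a.1 ≤ b.1)) :
    (pvLast l).Pairwise (fun a b => a.1 < b.1) := by
  induction l with
  | nil => simp [pvLast]
  | cons a t ih =>
    have hst := (List.pairwise_cons.mp hs).2
    have hat := (List.pairwise_cons.mp hs).1
    cases t with
    | nil => simp [pvLast]
    | cons q r =>
      by_cases hqa : q.1 ≠ a.1
      · rw [pvLast, if_pos hqa]
        have haq : a.1 < q.1 :=
          lt_of_le_of_ne (hat q (List.mem_cons_self)) (Ne.symm hqa)
        apply List.pairwise_cons.mpr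
        refine ⟨?_, ih hst⟩
        intro z hz
        have hzm := (pvLast_sublist (q :: r)).subset hz
        rcases List.mem_cons.mp hzm with rfl | hzm
        · exact haq
        · exact lt_of_lt_of_le haq ((List.pairwise_cons.mp hst).1 z hzm)
      · rw [pvLast, if_neg hqa]
        exact ih hst

-- sorted-map commutation: sorting a mapped list = mapping the sorted list (keys pulled back)
lemma pvInsertBy_map {α β : Type} (f : α → β) (key : β → String) (x : α) (ys : List α) :
    (PySem.List.insertBy (fun a b => decide (key (f a) < key (f b))) x ys).map f
    = PySem.List.insertBy (fun a b => decide (key a < key b)) (f x) (ys.map f) := by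
  induction ys with
  | nil => simp [PySem.List.insertBy]
  | cons y t ih =>
    simp only [PySem.List.insertBy, List.map_cons]
    by_cases h : key (f x) < key (f y)
    · rw [if_pos (decide_eq_true h), if_pos (decide_eq_true h)]
      simp
    · rw [if_neg (by simp [h]), if_neg (by simp [h]), List.map_cons, ih]

lemma pvSorted_map {α β : Type} (f : α → β) (key : β → String) (xs : List α) :
    PySem.List.sorted (xs.map f) key = (PySem.List.sorted xs (fun a => key (f a))).map f := by
  have main : ∀ (xs : List α) (acc : List α),
      (xs.map f).foldl (fun acc x => PySem.List.insertBy (fun a b => decide (key a < key b)) x acc) (acc.map f)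
      = (xs.foldl (fun acc x => PySem.List.insertBy (fun a b => decide (key (f a) < key (f b))) x acc) acc).map f := by
    intro xs
    induction xs with
    | nil => intro acc; simp
    | cons x t ih =>
      intro acc
      simp only [List.map_cons, List.foldl_cons]
      rw [← pvInsertBy_map f key x acc, ih]
  simpa [PySem.List.sorted] using main xs []

-- the core equality: B's kept pairs = A's items sorted by key
lemma pvMain (ps : List (String × String)) :
    pvLast (PySem.List.sorted ps (fun p => p.1))
    = PySem.List.sorted (pvDictOf ps).items (fun p => p.1) := by
  have hsp := PySem.List.sorted_pairwise ps (fun p : String × String => p.1)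
  have hlt := pvLastPairwise _ hsp
  have hndD : (pvDictOf ps).keys.Nodup := pvDictNodup ps
  have hkeys : (pvDictOf ps).keys = (pvDictOf ps).items.map Prod.fst := by
    simp [PySem.Dict.keys]
  have hitemsNodup : (pvDictOf ps).items.Nodup := List.Nodup.of_map Prod.fst (hkeys ▸ hndD)
  have hlastNodup : (pvLast (PySem.List.sorted ps (fun p => p.1))).Nodup := by
    have h1 : ((pvLast (PySem.List.sorted ps (fun p => p.1))).map Prod.fst).Pairwise (· < ·) :=
      List.pairwise_map.mpr hlt
    exact List.Nodup.of_map Prod.fst (h1.imp ne_of_lt)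
  have hperm : (pvLast (PySem.List.sorted ps (fun p => p.1))).Perm (pvDictOf ps).items := by
    rw [List.perm_ext_iff_of_nodup hlastNodup hitemsNodup]
    intro p
    rw [pvMemLast _ hsp, pvMemDict, pvFind_reverse_eq_getLast?, pvSorted_filter]
  exact (PySem.List.sorted_eq_of_perm_of_pairwise_lt _ _ _ hperm hlt).symm

-- ===== VERDICT (by name: the statement is the Claim_ definition above) =====
theorem normalise_style_string_spec : Claim_equal_normalise_style_string := by
  intro style _
  unfold Spec_normalise_style_string
  simp only [normalise_style_string, normalise_style_string_alt]
  rw [pvFoldA_eq, pvFoldB_eq]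
  simp only [List.nil_append]
  set ps := ((PySem.Str.split? style ";").getD []).filterMap pvParse? with hps
  have e1 : ps.foldl (fun d p => d.insert p.1 p.2) PySem.Dict.empty = pvDictOf ps := rfl
  rw [e1, pvEmit_eq_map, pvMain ps]
  congr 1
  have hndD : (pvDictOf ps).keys.Nodup := pvDictNodup ps
  have hitems := PySem.Dict.items_eq_map_keys (pvDictOf ps) hndD ""
  have h2 : PySem.List.sorted ((pvDictOf ps).keys.map (fun k => (k, (pvDictOf ps).getD k "")))
        (fun p => p.1)
      = (PySem.List.sorted (pvDictOf ps).keys (fun k => k)).map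
        (fun k => (k, (pvDictOf ps).getD k "")) :=
    pvSorted_map (fun k => (k, (pvDictOf ps).getD k "")) (fun p => p.1) _
  calc (PySem.List.sorted (pvDictOf ps).keys (fun k => k)).map
        (fun k => k ++ ":" ++ (pvDictOf ps).getD k "")
      = ((PySem.List.sorted (pvDictOf ps).keys (fun k => k)).map
          (fun k => (k, (pvDictOf ps).getD k ""))).map (fun p => p.1 ++ ":" ++ p.2) := by
        rw [List.map_map]
        rfl
    _ = (PySem.List.sorted (pvDictOf ps).items (fun p => p.1)).map (fun p => p.1 ++ ":" ++ p.2) := by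
        rw [← h2, ← hitems]
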